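-- pv_equiv track=rewrite | github.com/atanugiri/GhrelinBehaviorQuantification | Python_scripts/extract_health_name.py | extract_health_name
-- ===== SOURCE A (Python) =====
-- def extract_health_name(name):
--     """
--     Extracts health type based on animal names found in the input string.
--     """
--     name_lower = name.lower()
--
--     inhibitory = ['a', 'b', 'c', 'f', 'e', 'l', 'g', 'h', 'i', 'j', 'k', 'o', 'm', 'p', 'q']
--     ghrelin = ['ftworth', 'orlando', 'tampa', 'dallas', 'la', 'seattle', 'chicago',
--                'lascruces', 'tokyo', 'ruidoso', 'neworleans', 'atlanta', 'newyork', 'newjersey']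
--     saline = ['austin', 'houston', 'toronto', 'berlin', 'denver', 'elpaso', 'waco',
--               'lisbon', 'nairobi', 'rome', 'venice', 'paris', 'london', 'phoenix']
--     excitatory = ['dopey', 'sneezy', 'doc', 'grumpy', 'sleepy', 'bashful', 'happy',
--                   'sam', 'roy', 'ivy', 'may']
--
--     # Split name into underscore-separated tokens for accurate matching
--     tokens = name_lower.split('_')
--
--     # Priority-based matching
--     if any(token in inhibitory for token in tokens):
--         return 'Inhibitory'
--     elif any(token in ghrelin for token in tokens):
--         return 'Ghrelin'
--     elif any(token in saline for token in tokens):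
--         return 'Saline'
--     elif any(token in excitatory for token in tokens):
--         return 'Excitatory'
--     else:
--         return 'Unknown'
-- ===== SOURCE B (Python) =====
-- _PRIORITY = ['Inhibitory', 'Ghrelin', 'Saline', 'Excitatory']
--
-- _WORD_LABEL = {
--     word: label
--     for label, words in [
--         ('Inhibitory', ['a', 'b', 'c', 'f', 'e', 'l', 'g', 'h', 'i', 'j', 'k', 'o', 'm', 'p', 'q']),
--         ('Ghrelin', ['ftworth', 'orlando', 'tampa', 'dallas', 'la', 'seattle', 'chicago',
--                      'lascruces', 'tokyo', 'ruidoso', 'neworleans', 'atlanta', 'newyork', 'newjersey']),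
--         ('Saline', ['austin', 'houston', 'toronto', 'berlin', 'denver', 'elpaso', 'waco',
--                     'lisbon', 'nairobi', 'rome', 'venice', 'paris', 'london', 'phoenix']),
--         ('Excitatory', ['dopey', 'sneezy', 'doc', 'grumpy', 'sleepy', 'bashful', 'happy',
--                         'sam', 'roy', 'ivy', 'may']),
--     ]
--     for word in words
-- }
--
--
-- def extract_health_name(name):
--     """
--     Extracts health type based on animal names found in the input string.
--     """
--     labels = set()
--     for token in name.lower().split('_'):
--         label = _WORD_LABEL.get(token)
--         if label is not None:
--             labels.add(label)
--     for label in _PRIORITY: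
--         if label in labels:
--             return label
--     return 'Unknown'
-- ===== Notes on version B (the rewrite author's own statement) =====
-- stated objective: alternative
-- what changed: Replaces A's four sequential any() scans over separate word lists by one pass over the tokens against a single word-to-category dictionary, accumulating the set of categories found, followed by a separate fixed-priority resolution step.
import Mathlib
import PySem

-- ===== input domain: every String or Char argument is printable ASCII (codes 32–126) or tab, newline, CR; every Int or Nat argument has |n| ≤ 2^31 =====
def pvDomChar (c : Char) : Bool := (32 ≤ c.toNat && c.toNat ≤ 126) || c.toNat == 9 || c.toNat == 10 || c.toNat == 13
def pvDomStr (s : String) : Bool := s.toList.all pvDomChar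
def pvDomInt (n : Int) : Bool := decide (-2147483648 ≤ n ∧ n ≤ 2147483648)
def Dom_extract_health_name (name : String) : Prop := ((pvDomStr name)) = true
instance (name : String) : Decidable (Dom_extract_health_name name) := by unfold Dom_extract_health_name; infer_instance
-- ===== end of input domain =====

-- B replaces A's four sequential any() scans by one token pass over a single word→category table plus a fixed-priority resolution step (alternative decomposition, same cost).


-- ===== PORT A =====
def pvInhibitory : List String := ["a", "b", "c", "f", "e", "l", "g", "h", "i", "j", "k", "o", "m", "p", "q"]
def pvGhrelin : List String := ["ftworth", "orlando", "tampa", "dallas", "la", "seattle", "chicago",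
  "lascruces", "tokyo", "ruidoso", "neworleans", "atlanta", "newyork", "newjersey"]
def pvSaline : List String := ["austin", "houston", "toronto", "berlin", "denver", "elpaso", "waco",
  "lisbon", "nairobi", "rome", "venice", "paris", "london", "phoenix"]
def pvExcitatory : List String := ["dopey", "sneezy", "doc", "grumpy", "sleepy", "bashful", "happy",
  "sam", "roy", "ivy", "may"]

def extract_health_name (name : String) : String :=
  let name_lower := PySem.Str.lower name
  -- name_lower.split('_'): sep is non-empty, so Python never raises; exact via Chars.splitOn
  let tokens := (PySem.Chars.splitOn name_lower.toList ['_']).map String.ofList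
  if tokens.any (fun token => pvInhibitory.contains token) then "Inhibitory"
  else if tokens.any (fun token => pvGhrelin.contains token) then "Ghrelin"
  else if tokens.any (fun token => pvSaline.contains token) then "Saline"
  else if tokens.any (fun token => pvExcitatory.contains token) then "Excitatory"
  else "Unknown"

-- ===== PORT B =====
-- B's module-level dict comprehension over (label, words) pairs with pairwise-distinct words:
-- ported as the literal association list it builds, wrapped in PySem.Dict.
def pvWordLabel : PySem.Dict String String :=
  PySem.Dict.mk
    (pvInhibitory.map (fun w => (w, "Inhibitory")) ++
     pvGhrelin.map (fun w => (w, "Ghrelin")) ++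
     pvSaline.map (fun w => (w, "Saline")) ++
     pvExcitatory.map (fun w => (w, "Excitatory")))

def pvPriority : List String := ["Inhibitory", "Ghrelin", "Saline", "Excitatory"]

-- the second loop of B: first priority label present in the accumulated set
def pvPick : List String → PySem.Set String → String
  | [], _ => "Unknown"
  | l :: rest, s => if PySem.Set.contains s l then l else pvPick rest s

def extract_health_name_alt (name : String) : String :=
  let labels :=
    ((PySem.Chars.splitOn (PySem.Str.lower name).toList ['_']).map String.ofList).foldl
      (fun s token =>
        match pvWordLabel.get? token with
        | some label => PySem.Set.add s label
        | none => s)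
      PySem.Set.empty
  pvPick pvPriority labels

-- ===== PRECONDITION & SPEC =====
def Spec_extract_health_name (name : String) (out : String) : Prop := out = extract_health_name_alt name
instance (name : String) (out : String) : Decidable (Spec_extract_health_name name out) := by unfold Spec_extract_health_name; infer_instance

-- ===== CLAIM (what is proved, stated in full; the proofs are below) =====
def Claim_equal_extract_health_name : Prop := ∀ (name : String), Dom_extract_health_name name → Spec_extract_health_name name (extract_health_name name)

-- ===== LEMMAS AND PROOFS =====

-- lookup in a block of pairs all carrying the same label
theorem get?_mk_map_append (xs : List String) (v : String) (rest : List (String × String)) (t : String) :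
    (PySem.Dict.mk ((xs.map (fun w => (w, v))) ++ rest)).get? t =
      if xs.contains t then some v else (PySem.Dict.mk rest).get? t := by
  induction xs with
  | nil => simp
  | cons x xs ih =>
    simp only [List.map_cons, List.cons_append, PySem.Dict.get?_mk_cons, List.contains_cons]
    by_cases h : x = t
    · simp [h]
    · have hxt : (x == t) = false := by simp [h]
      have htx : ¬t = x := fun e => h e.symm
      simp [hxt, ih, htx]

theorem get?_wordLabel (t : String) :
    pvWordLabel.get? t =
      if pvInhibitory.contains t then some "Inhibitory"
      else if pvGhrelin.contains t then some "Ghrelin"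
      else if pvSaline.contains t then some "Saline"
      else if pvExcitatory.contains t then some "Excitatory"
      else none := by
  unfold pvWordLabel
  rw [List.append_assoc, List.append_assoc, get?_mk_map_append,
      get?_mk_map_append, get?_mk_map_append]
  have h : ((pvExcitatory.map (fun w => (w, "Excitatory"))) ++ ([] : List (String × String)))
      = pvExcitatory.map (fun w => (w, "Excitatory")) := by simp
  rw [← h, get?_mk_map_append]
  simp [PySem.Dict.get?]

-- the four word lists are pairwise disjoint
theorem disj_IG : ∀ t : String, t ∈ pvInhibitory → t ∉ pvGhrelin := by
  intro t ht; fin_cases ht <;> decide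
theorem disj_IS : ∀ t : String, t ∈ pvInhibitory → t ∉ pvSaline := by
  intro t ht; fin_cases ht <;> decide
theorem disj_IE : ∀ t : String, t ∈ pvInhibitory → t ∉ pvExcitatory := by
  intro t ht; fin_cases ht <;> decide
theorem disj_GS : ∀ t : String, t ∈ pvGhrelin → t ∉ pvSaline := by
  intro t ht; fin_cases ht <;> decide
theorem disj_GE : ∀ t : String, t ∈ pvGhrelin → t ∉ pvExcitatory := by
  intro t ht; fin_cases ht <;> decide
theorem disj_SE : ∀ t : String, t ∈ pvSaline → t ∉ pvExcitatory := by
  intro t ht; fin_cases ht <;> decide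

-- characterisation of the table lookup, one label at a time
theorem lookup_I (t : String) : pvWordLabel.get? t = some "Inhibitory" ↔ t ∈ pvInhibitory := by
  rw [get?_wordLabel]; split_ifs with a b c d
  · exact iff_of_true rfl (by simpa using a)
  all_goals exact iff_of_false (by simp) (by simpa using a)

theorem lookup_G (t : String) : pvWordLabel.get? t = some "Ghrelin" ↔ t ∈ pvGhrelin := by
  rw [get?_wordLabel]; split_ifs with a b c d
  · exact iff_of_false (by simp) (disj_IG t (by simpa using a))
  · exact iff_of_true rfl (by simpa using b)
  all_goals exact iff_of_false (by simp) (by simpa using b)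

theorem lookup_S (t : String) : pvWordLabel.get? t = some "Saline" ↔ t ∈ pvSaline := by
  rw [get?_wordLabel]; split_ifs with a b c d
  · exact iff_of_false (by simp) (disj_IS t (by simpa using a))
  · exact iff_of_false (by simp) (disj_GS t (by simpa using b))
  · exact iff_of_true rfl (by simpa using c)
  all_goals exact iff_of_false (by simp) (by simpa using c)

theorem lookup_E (t : String) : pvWordLabel.get? t = some "Excitatory" ↔ t ∈ pvExcitatory := by
  rw [get?_wordLabel]; split_ifs with a b c d
  · exact iff_of_false (by simp) (disj_IE t (by simpa using a))
  · exact iff_of_false (by simp) (disj_GE t (by simpa using b))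
  · exact iff_of_false (by simp) (disj_SE t (by simpa using c))
  · exact iff_of_true rfl (by simpa using d)
  · exact iff_of_false (by simp) (by simpa using d)

-- membership in the accumulated label set after the token pass
theorem contains_fold (ts : List String) (s : PySem.Set String) (l : String) :
    PySem.Set.contains
      (ts.foldl (fun s token =>
        match pvWordLabel.get? token with
        | some label => PySem.Set.add s label
        | none => s) s) l
    = (PySem.Set.contains s l || ts.any (fun t => pvWordLabel.get? t == some l)) := by
  induction ts generalizing s with
  | nil => simp
  | cons t ts ih =>
    simp only [List.foldl_cons, List.any_cons, ih]
    cases h : pvWordLabel.get? t with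
    | none => simp [h]
    | some lab =>
      simp only []
      by_cases hl : lab = l
      · subst hl
        simp [PySem.Set.contains_iff, PySem.Set.mem_add]
      · have h2 : (some lab == some l) = false := by simp [hl]
        have h3 : (decide (l = lab)) = false := decide_eq_false fun e => hl e.symm
        simp [h2, h3]

theorem any_get?_eq (ts : List String) (xs : List String) (v : String)
    (hv : ∀ t, pvWordLabel.get? t = some v ↔ t ∈ xs) :
    ts.any (fun t => pvWordLabel.get? t == some v) = ts.any (fun t => xs.contains t) := by
  induction ts with
  | nil => rfl
  | cons t ts ih =>
    simp only [List.any_cons, ih]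
    congr 1
    by_cases h : t ∈ xs
    · simp [h, (hv t).2 h]
    · have hn : pvWordLabel.get? t ≠ some v := fun hc => h ((hv t).1 hc)
      simp [h, hn]

-- the heart of the equivalence, over an arbitrary token list
theorem core (ts : List String) :
    (if ts.any (fun token => pvInhibitory.contains token) then "Inhibitory"
     else if ts.any (fun token => pvGhrelin.contains token) then "Ghrelin"
     else if ts.any (fun token => pvSaline.contains token) then "Saline"
     else if ts.any (fun token => pvExcitatory.contains token) then "Excitatory"
     else "Unknown")
    = pvPick pvPriority
        (ts.foldl (fun s token =>
          match pvWordLabel.get? token with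
          | some label => PySem.Set.add s label
          | none => s) PySem.Set.empty) := by
  simp only [pvPriority, pvPick]
  rw [contains_fold, contains_fold, contains_fold, contains_fold]
  rw [any_get?_eq ts pvInhibitory _ lookup_I, any_get?_eq ts pvGhrelin _ lookup_G,
      any_get?_eq ts pvSaline _ lookup_S, any_get?_eq ts pvExcitatory _ lookup_E]
  by_cases h1 : ts.any (fun t => pvInhibitory.contains t) <;>
    by_cases h2 : ts.any (fun t => pvGhrelin.contains t) <;>
      by_cases h3 : ts.any (fun t => pvSaline.contains t) <;>
        by_cases h4 : ts.any (fun t => pvExcitatory.contains t) <;>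
          simp [h1, h2, h3, h4, PySem.Set.empty, PySem.Set.contains]

-- ===== VERDICT (by name: the statement is the Claim_ definition above) =====
theorem extract_health_name_spec : Claim_equal_extract_health_name := by
  intro name _
  exact core ((PySem.Chars.splitOn (PySem.Str.lower name).toList ['_']).map String.ofList)
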